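-- pv_equiv track=rewrite | github.com/Bandi120424/Algorithm_Python | 백준/Gold/12904. A와 B/A와 B.py | target2val
-- ===== SOURCE A (Python) =====
-- def target2val(target, val):
--     while target:
--         last_char = target.pop()
--
--         if last_char == 'B':
--             target.reverse()
--
--         if ''.join(target) == val:
--             return 1
--
--     return 0
-- ===== SOURCE B (Python) =====
-- def target2val(target, val):
--     lo, hi = 0, len(target)
--     fwd = True                      # logical order is target[lo:hi]; False: that segment reversed
--     rem = sum(len(s) for s in target)
--     m = len(val)
--     while lo < hi:
--         if fwd:
--             hi -= 1
--             last = target[hi]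
--         else:
--             last = target[lo]
--             lo += 1
--         rem -= len(last)
--         if last == 'B':
--             fwd = not fwd
--         if rem == m:
--             seg = target[lo:hi]
--             if not fwd:
--                 seg.reverse()
--             if ''.join(seg) == val:
--                 return 1
--     return 0
-- ===== Notes on version B (the rewrite author's own statement) =====
-- stated objective: faster
-- what changed: Instead of popping, physically reversing and re-joining the whole list on every step (A), B keeps two cursors into the untouched list plus a direction flag and a running character count, and builds/compares the joined string only on steps where the remaining character count equals len(val).
import Mathlib
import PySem

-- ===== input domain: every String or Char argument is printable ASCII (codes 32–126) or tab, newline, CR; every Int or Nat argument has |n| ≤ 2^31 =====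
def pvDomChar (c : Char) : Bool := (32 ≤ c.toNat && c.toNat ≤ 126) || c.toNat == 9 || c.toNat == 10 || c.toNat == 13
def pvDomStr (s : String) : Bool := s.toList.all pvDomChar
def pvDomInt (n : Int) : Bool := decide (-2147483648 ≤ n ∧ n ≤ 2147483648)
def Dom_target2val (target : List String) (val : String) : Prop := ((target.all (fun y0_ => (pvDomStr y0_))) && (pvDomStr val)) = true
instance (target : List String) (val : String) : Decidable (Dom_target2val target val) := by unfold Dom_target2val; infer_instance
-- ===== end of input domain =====

-- B replaces A's pop/reverse/join-per-step loop (quadratic in total string size) by two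
-- cursors into the untouched list plus a direction flag and a running character count,
-- joining only when the remaining length equals len(val); equivalence is about the return
-- value only (Python A empties its argument list in place, B leaves it unchanged).

-- ===== PORT A =====
def target2valLoop (val : String) (t : List String) : Int :=
  if h : t = [] then 0
  else
    let last := t.getLast h
    let t1 := t.dropLast
    let t2 := if last = "B" then t1.reverse else t1
    if PySem.Str.join "" t2 = val then 1 else target2valLoop val t2
termination_by t.length
decreasing_by
  have : t.length ≠ 0 := fun hl => h (List.eq_nil_of_length_eq_zero hl)
  split <;> simp <;> omega

def target2val (target : List String) (val : String) : Int :=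
  target2valLoop val target

-- ===== PORT B =====
def target2valAltLoop (target : List String) (val : String) (m : Int)
    (fwd : Bool) (rem : Int) (lo hi : Nat) : Int :=
  if _h : lo < hi then
    let lo' := if fwd then lo else lo + 1
    let hi' := if fwd then hi - 1 else hi
    let last := if fwd then (PySem.List.pyGet? target ((hi - 1 : Nat) : Int)).getD ""
                else (PySem.List.pyGet? target ((lo : Nat) : Int)).getD ""
    let rem' := rem - PySem.Str.len last
    let fwd' := if last = "B" then !fwd else fwd
    if rem' = m then
      let seg := PySem.List.slice target (some (lo' : Int)) (some (hi' : Int))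
      let seg' := if fwd' then seg else seg.reverse
      if PySem.Str.join "" seg' = val then 1
      else target2valAltLoop target val m fwd' rem' lo' hi'
    else target2valAltLoop target val m fwd' rem' lo' hi'
  else 0
termination_by hi - lo
decreasing_by all_goals (split <;> omega)

def target2val_alt (target : List String) (val : String) : Int :=
  target2valAltLoop target val (PySem.Str.len val) true
    (target.foldl (fun a s => a + PySem.Str.len s) 0) 0 target.length

-- ===== PRECONDITION & SPEC =====
def Spec_target2val (target : List String) (val : String) (out : Int) : Prop := out = target2val_alt target val
instance (target : List String) (val : String) (out : Int) : Decidable (Spec_target2val target val out) := by unfold Spec_target2val; infer_instance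

-- ===== CLAIM (what is proved, stated in full; the proofs are below) =====
def Claim_equal_target2val : Prop := ∀ (target : List String) (val : String), Dom_target2val target val → Spec_target2val target val (target2val target val)

-- ===== LEMMAS AND PROOFS =====

/-- total character count of a list of strings (proof-side helper) -/
def slen (l : List String) : Int := (l.map fun s => (s.toList.length : Int)).sum

/-- the sublist B's cursors designate -/
def segOf (target : List String) (lo hi : Nat) : List String := (target.drop lo).take (hi - lo)

/-- the logical list B's state represents -/
def reprOf (target : List String) (fwd : Bool) (lo hi : Nat) : List String :=
  if fwd then segOf target lo hi else (segOf target lo hi).reverse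

theorem slen_reverse (l : List String) : slen l.reverse = slen l := by
  simp [slen]

theorem slen_append (l₁ l₂ : List String) : slen (l₁ ++ l₂) = slen l₁ + slen l₂ := by
  simp [slen]

theorem slen_cons (s : String) (l : List String) : slen (s :: l) = (s.toList.length : Int) + slen l := by
  simp [slen]

theorem foldl_slen (l : List String) (a : Int) :
    l.foldl (fun a s => a + PySem.Str.len s) a = a + slen l := by
  induction l generalizing a with
  | nil => simp [slen]
  | cons x xs ih =>
    rw [List.foldl_cons, ih, slen_cons, PySem.Str.len_eq]; ring

theorem flatten_intersperse_nil {α : Type} (xs : List (List α)) :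
    (xs.intersperse []).flatten = xs.flatten := by
  induction xs with
  | nil => rfl
  | cons x t ih =>
    cases t with
    | nil => rfl
    | cons y t' => simp_all

theorem join_len (l : List String) (val : String) (h : PySem.Str.join "" l = val) :
    slen l = PySem.Str.len val := by
  subst h
  rw [PySem.Str.len_eq, PySem.Str.toList_join]
  simp only [PySem.Chars.join, List.intercalate, String.toList_empty,
    flatten_intersperse_nil, List.length_flatten, List.map_map]
  rw [Nat.cast_list_sum, List.map_map]
  rfl

theorem seg_length (target : List String) {lo hi : Nat} (_h1 : lo ≤ hi) (h2 : hi ≤ target.length) :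
    (segOf target lo hi).length = hi - lo := by
  simp [segOf]; omega

theorem seg_ne_nil (target : List String) {lo hi : Nat} (h1 : lo < hi) (h2 : hi ≤ target.length) :
    segOf target lo hi ≠ [] := by
  intro h
  have := seg_length target (lo := lo) (hi := hi) (by omega) h2
  rw [h] at this; simp at this; omega

theorem seg_getLast? (target : List String) {lo hi : Nat} (h1 : lo < hi) (h2 : hi ≤ target.length) :
    (segOf target lo hi).getLast? = target[hi-1]? := by
  rw [List.getLast?_eq_getElem?, seg_length target (by omega) h2]
  simp only [segOf, List.getElem?_take, List.getElem?_drop]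
  rw [if_pos (by omega)]
  congr 1; omega

theorem seg_head? (target : List String) {lo hi : Nat} (h1 : lo < hi) (_h2 : hi ≤ target.length) :
    (segOf target lo hi).head? = target[lo]? := by
  rw [List.head?_eq_getElem?]
  simp only [segOf, List.getElem?_take, List.getElem?_drop]
  rw [if_pos (by omega)]
  simp

theorem seg_dropLast (target : List String) {lo hi : Nat} (_h1 : lo < hi) (h2 : hi ≤ target.length) :
    (segOf target lo hi).dropLast = segOf target lo (hi-1) := by
  rw [List.dropLast_eq_take, seg_length target (by omega) h2]
  simp only [segOf, List.take_take]
  congr 1; omega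

theorem seg_tail (target : List String) {lo hi : Nat} (_h1 : lo < hi) (_h2 : hi ≤ target.length) :
    (segOf target lo hi).tail = segOf target (lo+1) hi := by
  rw [← List.drop_one]
  simp only [segOf, List.drop_take, List.drop_drop]
  congr 1

theorem loopA_step (val : String) (t : List String) (h : t ≠ []) :
    target2valLoop val t =
      (if PySem.Str.join "" (if t.getLast h = "B" then t.dropLast.reverse else t.dropLast) = val then 1
       else target2valLoop val (if t.getLast h = "B" then t.dropLast.reverse else t.dropLast)) := by
  rw [target2valLoop]
  simp only [dif_neg h]

theorem loopB_step (target : List String) (val : String) (m : Int) (fwd : Bool) (rem : Int)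
    (lo hi : Nat) (h : lo < hi) :
    target2valAltLoop target val m fwd rem lo hi =
      (if rem - PySem.Str.len ((if fwd then (PySem.List.pyGet? target ((hi - 1 : Nat) : Int)).getD ""
                 else (PySem.List.pyGet? target ((lo : Nat) : Int)).getD "")) = m then
        (if PySem.Str.join ""
              (if (if (if fwd then (PySem.List.pyGet? target ((hi - 1 : Nat) : Int)).getD ""
                       else (PySem.List.pyGet? target ((lo : Nat) : Int)).getD "") = "B" then !fwd else fwd)
               then PySem.List.slice target (some ((if fwd then lo else lo + 1 : Nat) : Int)) (some ((if fwd then hi - 1 else hi : Nat) : Int))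
               else (PySem.List.slice target (some ((if fwd then lo else lo + 1 : Nat) : Int)) (some ((if fwd then hi - 1 else hi : Nat) : Int))).reverse) = val
         then 1
         else target2valAltLoop target val m
                (if (if fwd then (PySem.List.pyGet? target ((hi - 1 : Nat) : Int)).getD ""
                     else (PySem.List.pyGet? target ((lo : Nat) : Int)).getD "") = "B" then !fwd else fwd)
                (rem - PySem.Str.len ((if fwd then (PySem.List.pyGet? target ((hi - 1 : Nat) : Int)).getD ""
                     else (PySem.List.pyGet? target ((lo : Nat) : Int)).getD "")))
                (if fwd then lo else lo + 1) (if fwd then hi - 1 else hi))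
       else target2valAltLoop target val m
              (if (if fwd then (PySem.List.pyGet? target ((hi - 1 : Nat) : Int)).getD ""
                   else (PySem.List.pyGet? target ((lo : Nat) : Int)).getD "") = "B" then !fwd else fwd)
              (rem - PySem.Str.len ((if fwd then (PySem.List.pyGet? target ((hi - 1 : Nat) : Int)).getD ""
                   else (PySem.List.pyGet? target ((lo : Nat) : Int)).getD "")))
              (if fwd then lo else lo + 1) (if fwd then hi - 1 else hi)) := by
  rw [target2valAltLoop]
  simp only [dif_pos h]

theorem key (target : List String) (val : String) :
    ∀ k lo hi fwd, hi - lo = k → lo ≤ hi → hi ≤ target.length →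
      target2valAltLoop target val (PySem.Str.len val) fwd
        (slen (reprOf target fwd lo hi)) lo hi
      = target2valLoop val (reprOf target fwd lo hi) := by
  intro k
  induction k using Nat.strong_induction_on with
  | _ k ih =>
  intro lo hi fwd hk hle hhi
  rcases Nat.lt_or_ge lo hi with hlt | hge
  · have hne := seg_ne_nil target hlt hhi
    have hgetD : ∀ (i : Nat) (hi' : i < target.length),
        (PySem.List.pyGet? target (i : Int)).getD "" = target[i]'hi' := by
      intro i hi'
      rw [PySem.List.pyGet?_natCast, List.getElem?_eq_getElem hi', Option.getD_some]
    rw [loopB_step target val _ fwd _ lo hi hlt]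
    cases fwd with
    | true =>
      have hlastA : (segOf target lo hi).getLast hne = target[hi-1]'(by omega) := by
        have h := seg_getLast? target hlt hhi
        rw [List.getLast?_eq_some_getLast (h := hne), List.getElem?_eq_getElem (by omega)] at h
        exact Option.some.inj h
      have hrepr : reprOf target true lo hi = segOf target lo hi := by simp [reprOf]
      have hdecomp : segOf target lo hi
          = segOf target lo (hi-1) ++ [target[hi-1]'(by omega)] := by
        conv_lhs => rw [← List.dropLast_concat_getLast hne]
        rw [seg_dropLast target hlt hhi, hlastA]
      have hrem : slen (reprOf target true lo hi)
            - PySem.Str.len (target[hi-1]'(by omega))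
          = slen (segOf target lo (hi-1)) := by
        rw [hrepr, hdecomp, slen_append, PySem.Str.len_eq]
        simp [slen]
      -- rewrite B's last element
      simp only [reduceIte, Bool.not_true]
      rw [hgetD (hi-1) (by omega)]
      rw [hrem, hrepr, loopA_step val _ hne, hlastA, seg_dropLast target hlt hhi]
      have hsl : PySem.List.slice target (some (lo : Int)) (some ((hi-1 : Nat) : Int))
          = segOf target lo (hi-1) := by
        rw [PySem.List.slice_natCast]; rfl
      rw [hsl]
      have hlt' : (hi-1) - lo < k := by omega
      by_cases hB : target[hi-1]'(by omega) = "B"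
      · simp only [if_pos hB, Bool.false_eq_true, if_false]
        have hih := ih ((hi-1) - lo) hlt' lo (hi-1) false rfl (by omega) (by omega)
        have hr : reprOf target false lo (hi-1) = (segOf target lo (hi-1)).reverse := by
          simp [reprOf]
        rw [hr, slen_reverse] at hih
        by_cases hm : slen (segOf target lo (hi-1)) = PySem.Str.len val
        · rw [if_pos hm, hih]
        · rw [if_neg hm, hih, if_neg]
          intro hj
          exact hm (by simpa [slen_reverse] using join_len _ _ hj)
      · simp only [if_neg hB, if_true]
        have hih := ih ((hi-1) - lo) hlt' lo (hi-1) true rfl (by omega) (by omega)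
        have hr : reprOf target true lo (hi-1) = segOf target lo (hi-1) := by simp [reprOf]
        rw [hr] at hih
        by_cases hm : slen (segOf target lo (hi-1)) = PySem.Str.len val
        · rw [if_pos hm, hih]
        · rw [if_neg hm, hih, if_neg]
          intro hj
          exact hm (join_len _ _ hj)
    | false =>
      have hne' : (segOf target lo hi).reverse ≠ [] := by simpa using hne
      have hrepr : reprOf target false lo hi = (segOf target lo hi).reverse := by simp [reprOf]
      have hheadA : (segOf target lo hi).head hne = target[lo]'(by omega) := by
        have h := seg_head? target hlt hhi
        rw [List.head?_eq_some_head (h := hne), List.getElem?_eq_getElem (by omega)] at h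
        exact Option.some.inj h
      have hlastA : ((segOf target lo hi).reverse).getLast hne' = target[lo]'(by omega) := by
        have h : ((segOf target lo hi).reverse).getLast? = some (target[lo]'(by omega)) := by
          rw [List.getLast?_reverse, seg_head? target hlt hhi,
            List.getElem?_eq_getElem (by omega)]
        rw [List.getLast?_eq_some_getLast (h := hne')] at h
        exact Option.some.inj h
      have hdecomp : segOf target lo hi = target[lo]'(by omega) :: segOf target (lo+1) hi := by
        conv_lhs => rw [← List.cons_head_tail hne]
        rw [seg_tail target hlt hhi, hheadA]
      have hrem : slen (reprOf target false lo hi) - PySem.Str.len (target[lo]'(by omega))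
          = slen (segOf target (lo+1) hi) := by
        rw [hrepr, slen_reverse, hdecomp, slen_cons, PySem.Str.len_eq]
        ring
      simp only [Bool.false_eq_true, if_false, Bool.not_false]
      rw [hgetD lo (by omega)]
      rw [hrem, hrepr, loopA_step val _ hne', hlastA, List.dropLast_reverse,
        seg_tail target hlt hhi]
      have hsl : PySem.List.slice target (some ((lo+1 : Nat) : Int)) (some ((hi : Nat) : Int))
          = segOf target (lo+1) hi := by
        rw [PySem.List.slice_natCast]; rfl
      rw [hsl]
      have hlt' : hi - (lo+1) < k := by omega
      by_cases hB : target[lo]'(by omega) = "B"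
      · simp only [if_pos hB, if_true, List.reverse_reverse]
        have hih := ih (hi - (lo+1)) hlt' (lo+1) hi true rfl (by omega) hhi
        have hr : reprOf target true (lo+1) hi = segOf target (lo+1) hi := by simp [reprOf]
        rw [hr] at hih
        by_cases hm : slen (segOf target (lo+1) hi) = PySem.Str.len val
        · rw [if_pos hm, hih]
        · rw [if_neg hm, hih, if_neg]
          intro hj
          exact hm (join_len _ _ hj)
      · simp only [if_neg hB, Bool.false_eq_true, if_false]
        have hih := ih (hi - (lo+1)) hlt' (lo+1) hi false rfl (by omega) hhi
        have hr : reprOf target false (lo+1) hi = (segOf target (lo+1) hi).reverse := by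
          simp [reprOf]
        rw [hr, slen_reverse] at hih
        by_cases hm : slen (segOf target (lo+1) hi) = PySem.Str.len val
        · rw [if_pos hm, hih]
        · rw [if_neg hm, hih, if_neg]
          intro hj
          exact hm (by simpa [slen_reverse] using join_len _ _ hj)
  · -- base: lo = hi
    have heq : hi = lo := by omega
    subst heq
    have hseg : segOf target hi hi = [] := by simp [segOf]
    rw [target2valAltLoop]
    rw [dif_neg (by omega : ¬ hi < hi)]
    simp only [reprOf, hseg, List.reverse_nil, ite_self]
    rw [target2valLoop]
    simp

-- ===== VERDICT (by name: the statement is the Claim_ definition above) =====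
theorem target2val_spec : Claim_equal_target2val := by
  intro target val _
  unfold Spec_target2val target2val target2val_alt
  rw [foldl_slen]
  have h := key target val target.length 0 target.length true (by omega) (by omega) (le_refl _)
  simp only [reprOf, segOf, List.drop_zero, Nat.sub_zero, List.take_length] at h
  simpa using h.symm
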